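-- pv_equiv track=rewrite | github.com/simonjantsch/farkas | MDP.py | forwards_reachable
-- ===== SOURCE A (Python) =====
-- def get_state(A,index):
--     return index // A
--
-- def forwards_reachable(P,states,A):
--     reachable = states.copy()
--     while True:
--         current_size = len(reachable)
--         for (source,dest) in P.keys():
--             #this assumes that only pairs (s,d) appear in P.keys() where the corr. prob. is > 0
--             if get_state(A,source) in reachable:
--                 reachable.add(dest)
--         if len(reachable) == current_size:
--             break
--     return reachable
-- ===== SOURCE B (Python) =====
-- def forwards_reachable(P, states, A):
--     # Worklist BFS/DFS: index the edges by source state once, then expand each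
--     # newly reached state exactly one time instead of re-scanning all of P
--     # until a fixed point.
--     adj = {}
--     for (source, dest) in P.keys():
--         adj.setdefault(source // A, []).append(dest)
--     reachable = set(states)
--     stack = list(states)
--     while stack:
--         u = stack.pop()
--         for d in adj.get(u, []):
--             if d not in reachable:
--                 reachable.add(d)
--                 stack.append(d)
--     return reachable
-- ===== Notes on version B (the rewrite author's own statement) =====
-- stated objective: alternative
-- what changed: Replaces the repeat-until-no-growth full rescans of P.keys() with a worklist search over a source-state-to-destinations index built once: each reached state's outgoing edges are expanded exactly once instead of once per growth round.
import Mathlib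
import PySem

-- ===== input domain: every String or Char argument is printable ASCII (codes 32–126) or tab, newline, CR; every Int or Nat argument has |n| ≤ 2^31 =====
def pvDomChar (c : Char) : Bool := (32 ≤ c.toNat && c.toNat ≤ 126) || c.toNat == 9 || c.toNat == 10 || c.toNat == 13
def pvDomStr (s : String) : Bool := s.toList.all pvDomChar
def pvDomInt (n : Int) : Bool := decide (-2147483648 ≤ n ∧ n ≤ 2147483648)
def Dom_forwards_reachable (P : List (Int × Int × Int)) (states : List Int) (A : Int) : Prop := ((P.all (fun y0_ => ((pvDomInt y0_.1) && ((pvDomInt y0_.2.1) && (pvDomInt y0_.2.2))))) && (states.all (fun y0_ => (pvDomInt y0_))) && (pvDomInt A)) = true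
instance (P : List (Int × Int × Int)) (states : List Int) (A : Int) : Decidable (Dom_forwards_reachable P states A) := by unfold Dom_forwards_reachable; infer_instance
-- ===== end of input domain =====

-- B replaces A's repeat-until-no-growth rescans of all of P.keys() with a worklist
-- search over a source-state→destinations index built once (each reached state is
-- expanded exactly once).  Both functions return a Python set, whose element order
-- is unspecified (not modelled by PySem), so both ports return the reachable set
-- in canonical sorted order; the proof shows the two sets are equal.

-- ===== PORT A =====
-- P is the Lean encoding of the Python dict {(source, dest): prob}; P.keys() is the
-- distinct key pairs in first-insertion order.
def fr_keys (P : List (Int × Int × Int)) : List (Int × Int) :=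
  PySem.Set.ofList (P.map (fun t => (t.1, t.2.1)))

-- one 'for (source,dest) in P.keys()' pass of A, mutating the reachable set
def fr_sweepA (A : Int) (keys : List (Int × Int)) (R : List Int) : List Int :=
  keys.foldl (fun R e =>
    if PySem.Int.floordiv e.1 A ∈ R then PySem.Set.add R e.2 else R) R

-- A's 'while True' loop; fuel keys.length + 1 suffices: every pass before the last
-- strictly grows the set by dests of keys, of which there are at most keys.length.
def fr_loopA (A : Int) (keys : List (Int × Int)) : Nat → List Int → List Int
  | 0, R => R
  | fuel + 1, R =>
    let R' := fr_sweepA A keys R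
    if R'.length = R.length then R' else fr_loopA A keys fuel R'

def forwards_reachable (P : List (Int × Int × Int)) (states : List Int) (A : Int) : List Int :=
  PySem.List.sorted
    (fr_loopA A (fr_keys P) ((fr_keys P).length + 1) (PySem.Set.ofList states))
    (fun x => x) false

-- ===== PORT B =====
-- 'adj.setdefault(source // A, []).append(dest)' over P.keys()
def fr_adj (A : Int) (keys : List (Int × Int)) : PySem.Dict Int (List Int) :=
  keys.foldl (fun d e =>
      d.insert (PySem.Int.floordiv e.1 A) (d.getD (PySem.Int.floordiv e.1 A) [] ++ [e.2]))
    PySem.Dict.empty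

-- body of 'for d in adj.get(u, [])': add an unseen d to the set and push it
def fr_push (p : List Int × List Int) (d : Int) : List Int × List Int :=
  if d ∈ p.1 then p else (PySem.Set.add p.1 d, d :: p.2)

-- 'while stack': the stack is held top-first (cons = append, head = stack.pop());
-- the fuel argument only guards termination and is proved sufficient below
def fr_loopB (adj : PySem.Dict Int (List Int)) : Nat → List Int → List Int → List Int
  | 0, R, _ => R
  | _ + 1, R, [] => R
  | fuel + 1, R, u :: stack =>
    let p := (adj.getD u []).foldl fr_push (R, stack)
    fr_loopB adj fuel p.1 p.2

def forwards_reachable_alt (P : List (Int × Int × Int)) (states : List Int) (A : Int) : List Int :=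
  PySem.List.sorted
    (fr_loopB (fr_adj A (fr_keys P)) (states.length + (fr_keys P).length + 1)
      (PySem.Set.ofList states) (PySem.Set.ofList states))
    (fun x => x) false

-- ===== PRECONDITION & SPEC =====
-- Pre_ excludes only A = 0 with a nonempty P, where both Pythons raise
-- ZeroDivisionError on the first 'source // A'.
def Pre_forwards_reachable (P : List (Int × Int × Int)) (states : List Int) (A : Int) : Prop :=
  A ≠ 0 ∨ P = []
instance (P : List (Int × Int × Int)) (states : List Int) (A : Int) : Decidable (Pre_forwards_reachable P states A) := by unfold Pre_forwards_reachable; infer_instance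

def pvWitness_forwards_reachable : (List (Int × Int × Int)) × List Int × Int :=
  ([(2, 1, 1), (1, 3, 1)], [0, 2], 2)

def Spec_forwards_reachable (P : List (Int × Int × Int)) (states : List Int) (A : Int) (out : List Int) : Prop := out = forwards_reachable_alt P states A
instance (P : List (Int × Int × Int)) (states : List Int) (A : Int) (out : List Int) : Decidable (Spec_forwards_reachable P states A out) := by unfold Spec_forwards_reachable; infer_instance

-- ===== CLAIM (what is proved, stated in full; the proofs are below) =====
def Claim_equal_forwards_reachable : Prop := ∀ (P : List (Int × Int × Int)) (states : List Int) (A : Int), Dom_forwards_reachable P states A → Pre_forwards_reachable P states A → Spec_forwards_reachable P states A (forwards_reachable P states A)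

-- ===== LEMMAS AND PROOFS =====

-- the edge relation both programs explore: (source // A, dest) over the dict keys
def fr_edges (A : Int) (keys : List (Int × Int)) : List (Int × Int) :=
  keys.map (fun e => (PySem.Int.floordiv e.1 A, e.2))

-- reachability from S along E — what both result sets are shown to contain exactly
inductive fr_Reach (S : List Int) (E : List (Int × Int)) : Int → Prop
  | base {x : Int} : x ∈ S → fr_Reach S E x
  | step {u d : Int} : fr_Reach S E u → (u, d) ∈ E → fr_Reach S E d

theorem fr_Reach_subset {S : List Int} {E : List (Int × Int)} {T : List Int}
    (hS : ∀ x ∈ S, x ∈ T) (hcl : ∀ u d : Int, (u, d) ∈ E → u ∈ T → d ∈ T) :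
    ∀ x : Int, fr_Reach S E x → x ∈ T := by
  intro x h
  induction h with
  | base hx => exact hS _ hx
  | step hru hmem ih => exact hcl _ _ hmem ih

-- abstract single pass over precomputed edges (source state, dest)
def fr_sweepS (l : List (Int × Int)) (R : List Int) : List Int :=
  l.foldl (fun R e => if e.1 ∈ R then PySem.Set.add R e.2 else R) R

theorem fr_sweepA_eq_sweepS (A : Int) (keys : List (Int × Int)) (R : List Int) :
    fr_sweepA A keys R = fr_sweepS (fr_edges A keys) R := by
  simp [fr_sweepA, fr_sweepS, fr_edges, List.foldl_map]

theorem fr_sweepS_cons (e : Int × Int) (l : List (Int × Int)) (R : List Int) :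
    fr_sweepS (e :: l) R =
      fr_sweepS l (if e.1 ∈ R then PySem.Set.add R e.2 else R) := by
  simp [fr_sweepS]

theorem fr_prefix_sweepS : ∀ (l : List (Int × Int)) (R : List Int), R <+: fr_sweepS l R := by
  intro l
  induction l with
  | nil => intro R; simp [fr_sweepS]
  | cons e l ih =>
    intro R
    rw [fr_sweepS_cons]
    by_cases he : e.1 ∈ R
    · simp only [he, if_pos]
      refine List.IsPrefix.trans ?_ (ih _)
      rw [PySem.Set.add_eq_ite]
      split
      · exact List.prefix_refl R
      · exact ⟨[e.2], rfl⟩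
    · simpa [he] using ih R

theorem fr_sweepS_nodup : ∀ (l : List (Int × Int)) (R : List Int),
    R.Nodup → (fr_sweepS l R).Nodup := by
  intro l
  induction l with
  | nil => intro R h; simpa [fr_sweepS] using h
  | cons e l ih =>
    intro R h
    rw [fr_sweepS_cons]
    by_cases he : e.1 ∈ R
    · simp only [he, if_pos]
      exact ih _ (PySem.Set.nodup_add _ _ h)
    · simpa [he] using ih R h

theorem fr_sweepS_sound {S : List Int} {E : List (Int × Int)} :
    ∀ (l : List (Int × Int)) (R : List Int), (∀ e ∈ l, e ∈ E) →
      (∀ x ∈ R, fr_Reach S E x) → ∀ x ∈ fr_sweepS l R, fr_Reach S E x := by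
  intro l
  induction l with
  | nil => intro R _ hR; simpa [fr_sweepS] using hR
  | cons e l ih =>
    intro R hl hR
    rw [fr_sweepS_cons]
    by_cases he : e.1 ∈ R
    · simp only [he, if_pos]
      refine ih _ (fun e' he' => hl e' (List.mem_cons_of_mem _ he')) ?_
      intro x hx
      rcases (PySem.Set.mem_add _ _ _).1 hx with hx | hx
      · exact hR x hx
      · subst hx
        exact fr_Reach.step (hR _ he) (by simpa using hl e (List.mem_cons_self ..))
    · simp only [he, ite_false]
      exact ih _ (fun e' he' => hl e' (List.mem_cons_of_mem _ he')) hR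

theorem fr_sweepS_fix_closed : ∀ (l : List (Int × Int)) (R : List Int),
    fr_sweepS l R = R → ∀ e ∈ l, e.1 ∈ R → e.2 ∈ R := by
  intro l
  induction l with
  | nil => intro R _ e he; exact absurd he (List.not_mem_nil)
  | cons e l ih =>
    intro R hfix
    rw [fr_sweepS_cons] at hfix
    have hpre : (if e.1 ∈ R then PySem.Set.add R e.2 else R) = R := by
      have h1 : R <+: (if e.1 ∈ R then PySem.Set.add R e.2 else R) := by
        split
        · rw [PySem.Set.add_eq_ite]; split
          · exact List.prefix_refl R
          · exact ⟨[e.2], rfl⟩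
        · exact List.prefix_refl R
      have h2 : (if e.1 ∈ R then PySem.Set.add R e.2 else R) <+: R := by
        conv_rhs => rw [← hfix]
        exact fr_prefix_sweepS _ _
      exact h2.eq_of_length (Nat.le_antisymm h2.length_le h1.length_le)
    intro e' he'
    rcases List.mem_cons.1 he' with rfl | he'
    · intro hsrc
      rw [if_pos hsrc] at hpre
      by_contra hd
      rw [PySem.Set.add_of_not_mem hd] at hpre
      have := congrArg List.length hpre
      simp at this
    · rw [hpre] at hfix
      exact ih R hfix e' he'

-- every element the pass appends is a new dest of the edge list
theorem fr_sweepS_append : ∀ (l : List (Int × Int)) (R : List Int),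
    ∃ t, fr_sweepS l R = R ++ t ∧ ∀ x ∈ t, x ∉ R ∧ x ∈ l.map (fun e => e.2) := by
  intro l
  induction l with
  | nil => intro R; exact ⟨[], by simp [fr_sweepS]⟩
  | cons e l ih =>
    intro R
    rw [fr_sweepS_cons]
    by_cases he : e.1 ∈ R
    · simp only [he, if_pos]
      by_cases hd : e.2 ∈ R
      · rw [PySem.Set.add_of_mem hd]
        obtain ⟨t, ht, hall⟩ := ih R
        exact ⟨t, ht, fun x hx => ⟨(hall x hx).1, by
          rw [List.map_cons, List.mem_cons]; exact Or.inr (hall x hx).2⟩⟩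
      · rw [PySem.Set.add_of_not_mem hd]
        obtain ⟨t, ht, hall⟩ := ih (R ++ [e.2])
        refine ⟨e.2 :: t, by simpa using ht, ?_⟩
        intro x hx
        rw [List.mem_cons] at hx
        rw [List.map_cons, List.mem_cons]
        rcases hx with hx | hx
        · subst hx; exact ⟨hd, Or.inl rfl⟩
        · exact ⟨fun hxR => (hall x hx).1 (by simp [hxR]), Or.inr (hall x hx).2⟩
    · simp only [he]
      obtain ⟨t, ht, hall⟩ := ih R
      exact ⟨t, ht, fun x hx => ⟨(hall x hx).1, by
        rw [List.map_cons, List.mem_cons]; exact Or.inr (hall x hx).2⟩⟩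

def fr_missing (full : List (Int × Int)) (R : List Int) : Nat :=
  ((full.map (fun e => e.2)).filter (fun d => decide (d ∉ R))).length

-- a pass that changed the set strictly shrinks the count of unreached dests
theorem fr_missing_lt (full : List (Int × Int)) (R : List Int)
    (hne : fr_sweepS full R ≠ R) :
    fr_missing full (fr_sweepS full R) < fr_missing full R := by
  obtain ⟨t, ht, hall⟩ := fr_sweepS_append full R
  have htne : t ≠ [] := by
    intro h; subst h; simp at ht; exact hne ht
  obtain ⟨d, td, rfl⟩ := List.exists_cons_of_ne_nil htne
  have hd : d ∉ R ∧ d ∈ full.map (fun e => e.2) := hall d (by simp)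
  have hdR' : d ∈ fr_sweepS full R := by rw [ht]; simp
  have hsub : ((full.map (fun e => e.2)).filter (fun x => decide (x ∉ fr_sweepS full R))).Sublist
      ((full.map (fun e => e.2)).filter (fun x => decide (x ∉ R))) := by
    apply List.monotone_filter_right
    intro x hx
    simp only [decide_eq_true_eq] at *
    intro hxR
    exact hx ((fr_prefix_sweepS full R).subset hxR)
  unfold fr_missing
  apply Nat.lt_of_le_of_ne hsub.length_le
  intro heq
  have heqL := hsub.eq_of_length heq
  have hdin : d ∈ (full.map (fun e => e.2)).filter (fun x => decide (x ∉ R)) := by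
    rw [List.mem_filter]
    exact ⟨hd.2, by simpa using hd.1⟩
  rw [← heqL, List.mem_filter] at hdin
  have hnot : d ∉ fr_sweepS full R := by simpa using hdin.2
  exact hnot hdR'

-- properties of A's loop, by induction on its fuel
theorem fr_loopA_prefix (A : Int) (keys : List (Int × Int)) :
    ∀ (fuel : Nat) (R : List Int), R <+: fr_loopA A keys fuel R := by
  intro fuel
  induction fuel with
  | zero => intro R; exact List.prefix_refl R
  | succ n ih =>
    intro R
    simp only [fr_loopA, fr_sweepA_eq_sweepS]
    split
    · exact fr_prefix_sweepS _ R
    · exact (fr_prefix_sweepS _ R).trans (ih _)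

theorem fr_loopA_nodup (A : Int) (keys : List (Int × Int)) :
    ∀ (fuel : Nat) (R : List Int), R.Nodup → (fr_loopA A keys fuel R).Nodup := by
  intro fuel
  induction fuel with
  | zero => intro R h; exact h
  | succ n ih =>
    intro R h
    simp only [fr_loopA, fr_sweepA_eq_sweepS]
    split
    · exact fr_sweepS_nodup _ R h
    · exact ih _ (fr_sweepS_nodup _ R h)

theorem fr_loopA_sound {S : List Int} (A : Int) (keys : List (Int × Int)) :
    ∀ (fuel : Nat) (R : List Int),
      (∀ x ∈ R, fr_Reach S (fr_edges A keys) x) →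
      ∀ x ∈ fr_loopA A keys fuel R, fr_Reach S (fr_edges A keys) x := by
  intro fuel
  induction fuel with
  | zero => intro R h; exact h
  | succ n ih =>
    intro R h
    simp only [fr_loopA, fr_sweepA_eq_sweepS]
    split
    · exact fr_sweepS_sound _ R (fun e he => he) h
    · exact ih _ (fr_sweepS_sound _ R (fun e he => he) h)

theorem fr_loopA_fix (A : Int) (keys : List (Int × Int)) :
    ∀ (fuel : Nat) (R : List Int), fr_missing (fr_edges A keys) R < fuel →
      fr_sweepS (fr_edges A keys) (fr_loopA A keys fuel R) = fr_loopA A keys fuel R := by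
  intro fuel
  induction fuel with
  | zero => intro R hm; exact absurd hm (Nat.not_lt_zero _)
  | succ n ih =>
    intro R hm
    simp only [fr_loopA, fr_sweepA_eq_sweepS]
    by_cases hlen : (fr_sweepS (fr_edges A keys) R).length = R.length
    · simp only [hlen, if_pos]
      have hRR : fr_sweepS (fr_edges A keys) R = R :=
        ((fr_prefix_sweepS _ R).eq_of_length hlen.symm).symm
      rw [hRR, hRR]
    · simp only [hlen, ite_false]
      have hne : fr_sweepS (fr_edges A keys) R ≠ R := fun h => hlen (by rw [h])
      have := fr_missing_lt (fr_edges A keys) R hne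
      exact ih _ (by omega)

-- B-side: the adjacency index holds exactly the edge relation
theorem fr_edges_cons (A : Int) (e : Int × Int) (keys : List (Int × Int)) :
    fr_edges A (e :: keys) = (PySem.Int.floordiv e.1 A, e.2) :: fr_edges A keys := rfl

theorem fr_mem_adj_aux (A : Int) : ∀ (keys : List (Int × Int))
    (dct : PySem.Dict Int (List Int)) (u d : Int),
    (d ∈ (keys.foldl (fun dc e =>
        dc.insert (PySem.Int.floordiv e.1 A) (dc.getD (PySem.Int.floordiv e.1 A) [] ++ [e.2]))
        dct).getD u [] ↔ d ∈ dct.getD u [] ∨ (u, d) ∈ fr_edges A keys) := by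
  intro keys
  induction keys with
  | nil => intro dct u d; simp [fr_edges]
  | cons e keys ih =>
    intro dct u d
    rw [List.foldl_cons, ih, PySem.Dict.getD_insert, fr_edges_cons]
    by_cases hu : u = PySem.Int.floordiv e.1 A
    · subst hu
      rw [if_pos rfl]
      simp only [List.mem_append, List.mem_cons, Prod.mk.injEq, true_and]
      tauto
    · rw [if_neg hu]
      simp only [List.mem_cons, Prod.mk.injEq]
      have hne : ¬(u = PySem.Int.floordiv e.1 A ∧ d = e.2) := fun h => hu h.1
      tauto

theorem fr_mem_adj (A : Int) (keys : List (Int × Int)) (u d : Int) :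
    d ∈ (fr_adj A keys).getD u [] ↔ (u, d) ∈ fr_edges A keys := by
  rw [fr_adj, fr_mem_adj_aux]
  simp [PySem.Dict.getD, PySem.Dict.get?, PySem.Dict.empty]

-- the inner 'for d in adj.get(u, [])' fold: appends exactly the unseen dests
theorem fr_push_spec : ∀ (ds R stack : List Int),
    ∃ new : List Int,
      ds.foldl fr_push (R, stack) = (R ++ new, new.reverse ++ stack) ∧
      new.Nodup ∧ (∀ x ∈ new, x ∉ R ∧ x ∈ ds) ∧ (∀ x ∈ ds, x ∈ R ++ new) := by
  intro ds
  induction ds with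
  | nil => intro R stack; exact ⟨[], by simp⟩
  | cons d ds ih =>
    intro R stack
    rw [List.foldl_cons]
    by_cases hd : d ∈ R
    · rw [show fr_push (R, stack) d = (R, stack) by simp [fr_push, hd]]
      obtain ⟨new, heq, hnd, hmem, hall⟩ := ih R stack
      refine ⟨new, heq, hnd, ?_, ?_⟩
      · exact fun x hx => ⟨(hmem x hx).1, List.mem_cons_of_mem _ (hmem x hx).2⟩
      · intro x hx
        rcases List.mem_cons.1 hx with rfl | hx
        · exact List.mem_append.2 (Or.inl hd)
        · exact hall x hx
    · rw [show fr_push (R, stack) d = (R ++ [d], d :: stack) by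
        simp [fr_push, hd, PySem.Set.add_eq_ite]]
      obtain ⟨new, heq, hnd, hmem, hall⟩ := ih (R ++ [d]) (d :: stack)
      refine ⟨d :: new, ?_, ?_, ?_, ?_⟩
      · rw [heq]
        simp
      · refine List.nodup_cons.2 ⟨fun hdn => ?_, hnd⟩
        · exact (hmem d hdn).1 (by simp)
      · intro x hx
        rcases List.mem_cons.1 hx with rfl | hx
        · exact ⟨hd, List.mem_cons_self ..⟩
        · refine ⟨fun hxR => (hmem x hx).1 (by simp [hxR]), List.mem_cons_of_mem _ (hmem x hx).2⟩
      · intro x hx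
        rcases List.mem_cons.1 hx with rfl | hx
        · simp
        · have := hall x hx
          simpa using this

-- count of dests not yet reached (over the distinct dests of the edge list)
def fr_dests (E : List (Int × Int)) : List Int := PySem.Set.ofList (E.map (fun e => e.2))

def fr_missB (E : List (Int × Int)) (R : List Int) : Nat :=
  ((fr_dests E).filter (fun d => decide (d ∉ R))).length

theorem fr_nodup_length_le {l1 l2 : List Int} (h : l1.Nodup) (hs : l1 ⊆ l2) :
    l1.length ≤ l2.length := by
  calc l1.length = l1.toFinset.card := (List.toFinset_card_of_nodup h).symm
    _ ≤ l2.toFinset.card :=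
        Finset.card_le_card (fun x hx => List.mem_toFinset.2 (hs (List.mem_toFinset.1 hx)))
    _ ≤ l2.length := l2.toFinset_card_le

theorem fr_missB_step {E : List (Int × Int)} {R new : List Int}
    (hnd : new.Nodup) (hR : ∀ x ∈ new, x ∉ R) (hd : ∀ x ∈ new, x ∈ fr_dests E) :
    fr_missB E (R ++ new) + new.length ≤ fr_missB E R := by
  have hsub : (new ++ (fr_dests E).filter (fun d => decide (d ∉ R ++ new))) ⊆
      (fr_dests E).filter (fun d => decide (d ∉ R)) := by
    intro x hx
    rcases List.mem_append.1 hx with hx | hx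
    · exact List.mem_filter.2 ⟨hd x hx, by simpa using hR x hx⟩
    · rcases List.mem_filter.1 hx with ⟨h1, h2⟩
      refine List.mem_filter.2 ⟨h1, ?_⟩
      simp only [decide_eq_true_eq, List.mem_append] at h2 ⊢
      exact fun h => h2 (Or.inl h)
  have hnodup : (new ++ (fr_dests E).filter (fun d => decide (d ∉ R ++ new))).Nodup := by
    refine List.Nodup.append hnd (List.Nodup.filter _ (PySem.Set.nodup_ofList _)) ?_
    intro x hx hy
    rcases List.mem_filter.1 hy with ⟨_, h2⟩
    simp only [decide_eq_true_eq, List.mem_append] at h2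
    exact h2 (Or.inr hx)
  have hlen := fr_nodup_length_le hnodup hsub
  rw [List.length_append] at hlen
  unfold fr_missB
  omega

-- B's loop: with sufficient fuel, starting from a sound closed configuration,
-- the result extends R, stays duplicate-free, is sound, and is edge-closed
theorem fr_loopB_main (adj : PySem.Dict Int (List Int)) (E : List (Int × Int)) (S : List Int)
    (hadj : ∀ u d : Int, d ∈ adj.getD u [] ↔ (u, d) ∈ E) :
    ∀ (fuel : Nat) (R stack : List Int),
      stack.length + fr_missB E R < fuel →
      R.Nodup →
      (∀ x ∈ stack, x ∈ R) →
      (∀ x ∈ R, fr_Reach S E x) →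
      (∀ u d : Int, (u, d) ∈ E → u ∈ R → d ∈ R ∨ u ∈ stack) →
      R <+: fr_loopB adj fuel R stack ∧
      (fr_loopB adj fuel R stack).Nodup ∧
      (∀ x ∈ fr_loopB adj fuel R stack, fr_Reach S E x) ∧
      (∀ u d : Int, (u, d) ∈ E → u ∈ fr_loopB adj fuel R stack →
        d ∈ fr_loopB adj fuel R stack) := by
  intro fuel
  induction fuel with
  | zero => intro R stack hf; omega
  | succ n ih =>
    intro R stack hf hnd hstk hsnd hcl
    match stack with
    | [] =>
      refine ⟨List.prefix_refl R, hnd, hsnd, ?_⟩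
      intro u d hud hu
      rcases hcl u d hud hu with h | h
      · exact h
      · exact absurd h (List.not_mem_nil)
    | u :: stack =>
      obtain ⟨new, heq, hnewnd, hnewmem, hall⟩ := fr_push_spec (adj.getD u []) R stack
      have hstep : fr_loopB adj (n + 1) R (u :: stack) =
          fr_loopB adj n (R ++ new) (new.reverse ++ stack) := by
        simp only [fr_loopB, heq]
      rw [hstep]
      have hnew_dest : ∀ x ∈ new, x ∈ fr_dests E := by
        intro x hx
        have : (u, x) ∈ E := (hadj u x).1 (hnewmem x hx).2
        exact (PySem.Set.mem_ofList _ _).2 (List.mem_map.2 ⟨(u, x), this, rfl⟩)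
      have hmb := fr_missB_step hnewnd (fun x hx => (hnewmem x hx).1) hnew_dest
      have hf' : (new.reverse ++ stack).length + fr_missB E (R ++ new) < n := by
        rw [List.length_append, List.length_reverse]
        simp only [List.length_cons] at hf
        omega
      have hnd' : (R ++ new).Nodup := by
        refine List.Nodup.append hnd hnewnd ?_
        intro x hx hy
        exact (hnewmem x hy).1 hx
      have hstk' : ∀ x ∈ new.reverse ++ stack, x ∈ R ++ new := by
        intro x hx
        rcases List.mem_append.1 hx with hx | hx
        · exact List.mem_append.2 (Or.inr (List.mem_reverse.1 hx))
        · exact List.mem_append.2 (Or.inl (hstk x (List.mem_cons_of_mem _ hx)))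
      have hsnd' : ∀ x ∈ R ++ new, fr_Reach S E x := by
        intro x hx
        rcases List.mem_append.1 hx with hx | hx
        · exact hsnd x hx
        · exact fr_Reach.step (hsnd u (hstk u (List.mem_cons_self ..)))
            ((hadj u x).1 (hnewmem x hx).2)
      have hcl' : ∀ v d : Int, (v, d) ∈ E → v ∈ R ++ new →
          d ∈ R ++ new ∨ v ∈ new.reverse ++ stack := by
        intro v d hvd hv
        by_cases hvu : v = u
        · subst hvu
          exact Or.inl (hall d ((hadj v d).2 hvd))
        · rcases List.mem_append.1 hv with hv | hv
          · rcases hcl v d hvd hv with h | h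
            · exact Or.inl (List.mem_append.2 (Or.inl h))
            · rcases List.mem_cons.1 h with h | h
              · exact absurd h hvu
              · exact Or.inr (List.mem_append.2 (Or.inr h))
          · exact Or.inr (List.mem_append.2 (Or.inl (List.mem_reverse.2 hv)))
      obtain ⟨hp, h2, h3, h4⟩ := ih (R ++ new) (new.reverse ++ stack) hf' hnd' hstk' hsnd' hcl'
      exact ⟨(List.prefix_append R new).trans hp, h2, h3, h4⟩

-- ===== VERDICT (by name: the statement is the Claim_ definition above) =====
theorem forwards_reachable_spec : Claim_equal_forwards_reachable := by
  intro P states A _ _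
  unfold Spec_forwards_reachable forwards_reachable forwards_reachable_alt
  set keys := fr_keys P with hkeys
  set E := fr_edges A keys with hE
  -- A's result
  have hA_nodup : (fr_loopA A keys (keys.length + 1) (PySem.Set.ofList states)).Nodup :=
    fr_loopA_nodup A keys _ _ (PySem.Set.nodup_ofList _)
  have hA_sound : ∀ x ∈ fr_loopA A keys (keys.length + 1) (PySem.Set.ofList states),
      fr_Reach states E x := by
    refine fr_loopA_sound A keys _ _ ?_
    intro x hx
    exact fr_Reach.base ((PySem.Set.mem_ofList _ _).1 hx)
  have hmissA : fr_missing E (PySem.Set.ofList states) < keys.length + 1 := by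
    have h1 : fr_missing E (PySem.Set.ofList states) ≤ (E.map (fun e => e.2)).length :=
      List.length_filter_le _ _
    have h2 : (E.map (fun e => e.2)).length = keys.length := by
      simp [hE, fr_edges]
    omega
  have hA_closed : ∀ u d : Int, (u, d) ∈ E →
      u ∈ fr_loopA A keys (keys.length + 1) (PySem.Set.ofList states) →
      d ∈ fr_loopA A keys (keys.length + 1) (PySem.Set.ofList states) := by
    intro u d hud hu
    exact fr_sweepS_fix_closed E _ (fr_loopA_fix A keys _ _ hmissA) (u, d) hud hu
  have hA_complete : ∀ x : Int, fr_Reach states E x →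
      x ∈ fr_loopA A keys (keys.length + 1) (PySem.Set.ofList states) := by
    refine fr_Reach_subset ?_ hA_closed
    intro x hx
    exact (fr_loopA_prefix A keys _ _).subset ((PySem.Set.mem_ofList _ _).2 hx)
  -- B's result
  have hfB : (PySem.Set.ofList states).length + fr_missB E (PySem.Set.ofList states) <
      states.length + keys.length + 1 := by
    have h1 : (PySem.Set.ofList states).length ≤ states.length :=
      PySem.Set.length_ofList_le _
    have h2 : fr_missB E (PySem.Set.ofList states) ≤ keys.length := by
      have h3 : fr_missB E (PySem.Set.ofList states) ≤ (fr_dests E).length :=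
        List.length_filter_le _ _
      have h4 : (fr_dests E).length ≤ (E.map (fun e => e.2)).length :=
        PySem.Set.length_ofList_le _
      have h5 : (E.map (fun e => e.2)).length = keys.length := by
        simp [hE, fr_edges]
      omega
    omega
  obtain ⟨hB_pre, hB_nodup, hB_sound, hB_closed⟩ :=
    fr_loopB_main (fr_adj A keys) E states (fun u d => fr_mem_adj A keys u d)
      (states.length + keys.length + 1) (PySem.Set.ofList states) (PySem.Set.ofList states)
      hfB (PySem.Set.nodup_ofList _) (fun x hx => hx)
      (fun x hx => fr_Reach.base ((PySem.Set.mem_ofList _ _).1 hx))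
      (fun u d _ hu => Or.inr hu)
  have hB_complete : ∀ x : Int, fr_Reach states E x →
      x ∈ fr_loopB (fr_adj A keys) (states.length + keys.length + 1)
        (PySem.Set.ofList states) (PySem.Set.ofList states) := by
    refine fr_Reach_subset ?_ hB_closed
    intro x hx
    exact hB_pre.subset ((PySem.Set.mem_ofList _ _).2 hx)
  -- the two sets are equal, hence their sorted forms are equal
  rw [PySem.List.sorted_id_eq_sorted_id_iff_perm]
  refine (List.perm_ext_iff_of_nodup hA_nodup hB_nodup).2 ?_
  intro a
  constructor
  · intro ha
    exact hB_complete a (hA_sound a ha)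
  · intro ha
    exact hA_complete a (hB_sound a ha)
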